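-- pv_equiv track=rewrite | github.com/wpan36/notecraft-ai | backend/app/services/notes_service.py | _normalize_names
-- ===== SOURCE A (Python) =====
-- from typing import List, Optional, Sequence
--
-- def _normalize_names(tag_names: Optional[List[str]]) -> List[str]:
--     if not tag_names:
--         return []
--     cleaned = [n.strip() for n in tag_names if isinstance(n, str) and n.strip()]
--     seen = set()
--     ordered = []
--     for n in sorted(cleaned, key=lambda x: x.lower()):
--         low = n.lower()
--         if low not in seen:
--             seen.add(low)
--             ordered.append(n)
--     return ordered
-- ===== SOURCE B (Python) =====
-- from typing import List, Optional
--
-- def _normalize_names(tag_names):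
--     seen = {}
--     for n in (tag_names or []):
--         if not isinstance(n, str):
--             continue
--         s = n.strip()
--         if not s:
--             continue
--         low = s.lower()
--         if low not in seen:
--             seen[low] = s
--     return sorted(seen.values(), key=str.lower)
-- ===== Notes on version B (the rewrite author's own statement) =====
-- stated objective: alternative
-- what changed: B dedupes first with a first-wins dict keyed by lowercase and sorts only the surviving distinct values once, replacing A's sort-everything-then-scan-with-a-set-and-append loop.
import Mathlib
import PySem

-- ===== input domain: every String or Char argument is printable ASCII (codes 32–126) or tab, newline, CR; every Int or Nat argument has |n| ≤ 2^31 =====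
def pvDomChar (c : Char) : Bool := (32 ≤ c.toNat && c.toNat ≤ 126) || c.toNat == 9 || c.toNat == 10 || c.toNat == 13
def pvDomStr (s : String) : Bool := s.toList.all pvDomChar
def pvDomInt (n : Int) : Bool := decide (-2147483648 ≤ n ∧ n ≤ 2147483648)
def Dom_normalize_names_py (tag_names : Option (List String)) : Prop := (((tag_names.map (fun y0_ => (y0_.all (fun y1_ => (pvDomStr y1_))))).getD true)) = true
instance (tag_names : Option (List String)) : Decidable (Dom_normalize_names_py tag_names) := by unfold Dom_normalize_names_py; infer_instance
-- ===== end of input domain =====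

-- B dedupes first (first-wins dict keyed by lowercase) and sorts the surviving values once,
-- instead of A's sort-then-scan-with-a-set; same return value, no speed claim.

-- ===== PORT A =====
def normalize_names_py (tag_names : Option (List String)) : List String :=
  match tag_names with
  | none => []
  | some xs =>
    if xs = [] then []
    else
      let cleaned := (xs.filter (fun n => !(PySem.Str.strip n == ""))).map (fun n => PySem.Str.strip n)
      let res := (PySem.List.sorted cleaned (fun x => PySem.Str.lower x) false).foldl
        (fun (st : PySem.Set String × List String) n =>
          if PySem.Set.contains st.1 (PySem.Str.lower n) then st
          else (PySem.Set.add st.1 (PySem.Str.lower n), st.2 ++ [n]))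
        (PySem.Set.empty, [])
      res.2

-- ===== PORT B =====
def normalize_names_py_alt (tag_names : Option (List String)) : List String :=
  let xs := tag_names.getD []
  let seen := xs.foldl
    (fun (d : PySem.Dict String String) n =>
      if PySem.Str.strip n = "" then d
      else
        if PySem.Dict.contains d (PySem.Str.lower (PySem.Str.strip n)) then d
        else PySem.Dict.insert d (PySem.Str.lower (PySem.Str.strip n)) (PySem.Str.strip n))
    PySem.Dict.empty
  PySem.List.sorted (PySem.Dict.values seen) (fun x => PySem.Str.lower x) false

-- ===== PRECONDITION & SPEC =====
def Spec_normalize_names_py (tag_names : Option (List String)) (out : List String) : Prop := out = normalize_names_py_alt tag_names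
instance (tag_names : Option (List String)) (out : List String) : Decidable (Spec_normalize_names_py tag_names out) := by unfold Spec_normalize_names_py; infer_instance

-- ===== CLAIM (what is proved, stated in full; the proofs are below) =====
def Claim_equal_normalize_names_py : Prop := ∀ (tag_names : Option (List String)), Dom_normalize_names_py tag_names → Spec_normalize_names_py tag_names (normalize_names_py tag_names)

-- ===== LEMMAS AND PROOFS =====

-- the dedup key: lowercase
def pvKey (s : String) : String := PySem.Str.lower s

-- first-occurrence-per-key dedup, parameterised by the keys already seen
def pvDedup (seen : List String) : List String → List String
  | [] => []
  | y :: ys => if pvKey y ∈ seen then pvDedup seen ys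
               else y :: pvDedup (pvKey y :: seen) ys

-- the cleaned list both programs work on
def pvClean (xs : List String) : List String :=
  (xs.filter (fun n => !(PySem.Str.strip n == ""))).map (fun n => PySem.Str.strip n)

theorem pvClean_cons (n : String) (t : List String) :
    pvClean (n :: t) = if PySem.Str.strip n = "" then pvClean t else PySem.Str.strip n :: pvClean t := by
  simp only [pvClean, List.filter_cons]
  by_cases h : PySem.Str.strip n = "" <;> simp [h]

theorem pvDedup_sublist (l seen : List String) : (pvDedup seen l).Sublist l := by
  induction l generalizing seen with
  | nil => simp [pvDedup]
  | cons y ys ih =>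
    simp only [pvDedup]
    split
    · exact (ih seen).cons y
    · exact (ih (pvKey y :: seen)).cons₂ y

theorem pvDedup_keys_nodup (l seen : List String) :
    ((pvDedup seen l).map pvKey).Nodup ∧ ∀ k ∈ (pvDedup seen l).map pvKey, k ∉ seen := by
  induction l generalizing seen with
  | nil => simp [pvDedup]
  | cons y ys ih =>
    simp only [pvDedup]
    split
    · exact ih seen
    · rename_i hns
      obtain ⟨hnd, hout⟩ := ih (pvKey y :: seen)
      constructor
      · simp only [List.map_cons, List.nodup_cons]
        exact ⟨fun hmem => (hout _ hmem) List.mem_cons_self, hnd⟩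
      · intro k hk
        simp only [List.map_cons, List.mem_cons] at hk
        rcases hk with rfl | hk
        · exact hns
        · exact fun hs => (hout k hk) (List.mem_cons_of_mem _ hs)

theorem mem_pvDedup (l : List String) (seen : List String) (x : String) :
    x ∈ pvDedup seen l ↔ pvKey x ∉ seen ∧ (l.filter (fun y => decide (pvKey y = pvKey x))).head? = some x := by
  induction l generalizing seen with
  | nil => simp [pvDedup]
  | cons y ys ih =>
    simp only [pvDedup]
    by_cases hky : pvKey y = pvKey x
    · rw [List.filter_cons_of_pos (by simpa using hky)]
      split
      · rename_i hseen
        rw [ih]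
        simp only [List.head?_cons]
        constructor
        · rintro ⟨hns, _⟩
          exact absurd (hky ▸ hseen) hns
        · rintro ⟨hns, _⟩
          exact absurd (hky ▸ hseen) hns
      · rename_i hseen
        simp only [List.mem_cons, List.head?_cons]
        constructor
        · rintro (rfl | hmem)
          · exact ⟨fun h => hseen (hky ▸ h), rfl⟩
          · rw [ih] at hmem
            exact absurd (show pvKey x ∈ pvKey y :: seen from by simp [hky]) hmem.1
        · rintro ⟨hns, hy⟩
          exact Or.inl (Option.some.inj hy).symm
    · rw [List.filter_cons_of_neg (by simpa using hky)]
      split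
      · exact ih seen
      · simp only [List.mem_cons]
        rw [ih]
        constructor
        · rintro (rfl | ⟨hns, hhd⟩)
          · exact absurd rfl hky
          · exact ⟨fun h => hns (List.mem_cons_of_mem _ h), hhd⟩
        · rintro ⟨hns, hhd⟩
          refine Or.inr ⟨?_, hhd⟩
          simp only [List.mem_cons]
          rintro (h | h)
          · exact hky h.symm
          · exact hns h

-- inserting into a key-sorted accumulator preserves each key-class as a list (x goes last in its class)
theorem pvFilter_insertBy (x : String) (acc : List String) (k : String)
    (hpw : acc.Pairwise (fun a b => pvKey a ≤ pvKey b)) :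
    (PySem.List.insertBy (fun a b => decide (pvKey a < pvKey b)) x acc).filter (fun y => decide (pvKey y = k))
      = acc.filter (fun y => decide (pvKey y = k)) ++ (if pvKey x = k then [x] else []) := by
  induction acc with
  | nil =>
    simp only [PySem.List.insertBy, List.filter_nil, List.nil_append, List.filter_cons]
    split <;> simp_all
  | cons y ys ih =>
    rw [List.pairwise_cons] at hpw
    obtain ⟨hy, hys⟩ := hpw
    by_cases hb : pvKey x < pvKey y
    · have hrw : PySem.List.insertBy (fun a b => decide (pvKey a < pvKey b)) x (y :: ys) = x :: y :: ys := by
        simp [PySem.List.insertBy, hb]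
      rw [hrw]
      by_cases hxk : pvKey x = k
      · have hempty : (y :: ys).filter (fun z => decide (pvKey z = k)) = [] := by
          rw [List.filter_eq_nil_iff]
          intro z hz
          simp only [decide_eq_true_eq]
          intro hzk
          have hyz : pvKey y ≤ pvKey z := by
            rcases hz with _ | hz
            · exact le_refl _
            · exact hy z (by assumption)
          exact absurd (hzk ▸ (hxk ▸ hb)) (not_lt.mpr hyz)
        rw [List.filter_cons_of_pos (by simpa using hxk), hempty]
        simp [hxk]
      · rw [List.filter_cons_of_neg (by simpa using hxk)]
        simp [hxk]
    · have hrw : PySem.List.insertBy (fun a b => decide (pvKey a < pvKey b)) x (y :: ys)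
          = y :: PySem.List.insertBy (fun a b => decide (pvKey a < pvKey b)) x ys := by
        simp [PySem.List.insertBy, hb]
      rw [hrw]
      by_cases hyk : pvKey y = k
      · rw [List.filter_cons_of_pos (by simpa using hyk), List.filter_cons_of_pos (by simpa using hyk),
            ih hys]
        simp
      · rw [List.filter_cons_of_neg (by simpa using hyk), List.filter_cons_of_neg (by simpa using hyk),
            ih hys]

-- STABILITY of PySem's sort: each key-class survives in its original order
theorem pvSorted_filter_stable (l : List String) (k : String) :
    (PySem.List.sorted l (fun x => pvKey x) false).filter (fun y => decide (pvKey y = k))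
      = l.filter (fun y => decide (pvKey y = k)) := by
  induction l using List.reverseRecOn with
  | nil => rfl
  | append_singleton l x ih =>
    have hfold : PySem.List.sorted (l ++ [x]) (fun x => pvKey x) false
        = PySem.List.insertBy (fun a b => decide (pvKey a < pvKey b)) x
            (PySem.List.sorted l (fun x => pvKey x) false) := by
      rw [PySem.List.sorted_eq_foldl_insertBy, PySem.List.sorted_eq_foldl_insertBy, List.foldl_append]
      rfl
    rw [hfold, pvFilter_insertBy x _ k (PySem.List.sorted_pairwise l (fun x => pvKey x)),
        ih, List.filter_append]
    congr 1
    split <;> simp_all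

-- A's loop: one scan with a seen-set computes pvDedup
theorem pvA_loop (l : List String) (S : PySem.Set String) (out : List String) (seen : List String)
    (h : ∀ kk, kk ∈ seen ↔ kk ∈ S) :
    (l.foldl
      (fun (st : PySem.Set String × List String) n =>
        if PySem.Set.contains st.1 (PySem.Str.lower n) then st
        else (PySem.Set.add st.1 (PySem.Str.lower n), st.2 ++ [n])) (S, out)).2
      = out ++ pvDedup seen l := by
  induction l generalizing S out seen with
  | nil => simp [pvDedup]
  | cons y ys ih =>
    simp only [List.foldl_cons, pvDedup]
    by_cases hc : pvKey y ∈ seen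
    · rw [if_pos hc,
          if_pos (show S.contains (PySem.Str.lower y) = true from
            (PySem.Set.contains_iff S _).mpr ((h _).mp hc))]
      exact ih S out seen h
    · have hcS : ¬ (PySem.Set.contains S (PySem.Str.lower y) = true) :=
        fun hh => hc ((h _).mpr ((PySem.Set.contains_iff S _).mp hh))
      rw [if_neg hc, if_neg hcS]
      rw [ih (PySem.Set.add S (PySem.Str.lower y)) (out ++ [y]) (pvKey y :: seen) ?_]
      · simp
      · intro kk
        rw [PySem.Set.mem_add]
        simp only [List.mem_cons, h kk, pvKey]
        tauto

-- B's loop: a first-wins dict over the input is pvDedup of the cleaned list (values in first-insertion order)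
theorem pvB_loop (xs : List String) (d : PySem.Dict String String) (seen : List String)
    (h : ∀ kk, kk ∈ seen ↔ PySem.Dict.contains d kk = true) :
    PySem.Dict.values (xs.foldl
      (fun (d : PySem.Dict String String) n =>
        if PySem.Str.strip n = "" then d
        else
          if PySem.Dict.contains d (PySem.Str.lower (PySem.Str.strip n)) then d
          else PySem.Dict.insert d (PySem.Str.lower (PySem.Str.strip n)) (PySem.Str.strip n)) d)
      = PySem.Dict.values d ++ pvDedup seen (pvClean xs) := by
  induction xs generalizing d seen with
  | nil => simp [pvClean, pvDedup]
  | cons n t ih =>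
    simp only [List.foldl_cons, pvClean_cons]
    by_cases hs : PySem.Str.strip n = ""
    · rw [if_pos hs, if_pos hs]
      exact ih d seen h
    · rw [if_neg hs, if_neg hs]
      simp only [pvDedup]
      by_cases hc : pvKey (PySem.Str.strip n) ∈ seen
      · rw [if_pos hc,
            if_pos (show d.contains (PySem.Str.lower (PySem.Str.strip n)) = true from (h _).mp hc)]
        exact ih d seen h
      · have hcd : ¬ (PySem.Dict.contains d (PySem.Str.lower (PySem.Str.strip n)) = true) :=
          fun hh => hc ((h _).mpr hh)
        rw [if_neg hc, if_neg hcd]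
        have hmem : ∀ kk, kk ∈ pvKey (PySem.Str.strip n) :: seen
            ↔ (PySem.Dict.insert d (PySem.Str.lower (PySem.Str.strip n)) (PySem.Str.strip n)).contains kk = true := by
          intro kk
          simp only [List.mem_cons, h kk, PySem.Dict.contains_insert, Bool.or_eq_true, beq_iff_eq, pvKey]
        rw [ih (PySem.Dict.insert d (PySem.Str.lower (PySem.Str.strip n)) (PySem.Str.strip n))
            (pvKey (PySem.Str.strip n) :: seen) hmem]
        have hcd' : d.contains (PySem.Str.lower (PySem.Str.strip n)) = false := by
          simpa using hcd
        have hit := PySem.Dict.items_insert_of_not_contains d (PySem.Str.strip n) hcd'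
        have hvals : (PySem.Dict.insert d (PySem.Str.lower (PySem.Str.strip n)) (PySem.Str.strip n)).values
            = d.values ++ [PySem.Str.strip n] := by
          simp [PySem.Dict.values, hit]
        rw [hvals]
        simp

-- ===== VERDICT (by name: the statement is the Claim_ definition above) =====
theorem normalize_names_py_spec : Claim_equal_normalize_names_py := by
  intro tag_names _
  unfold Spec_normalize_names_py
  cases tag_names with
  | none => rfl
  | some xs =>
    by_cases hxs : xs = []
    · subst hxs; rfl
    · have hA : normalize_names_py (some xs)
          = pvDedup [] (PySem.List.sorted (pvClean xs) (fun x => pvKey x) false) := by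
        simp only [normalize_names_py]
        rw [if_neg hxs]
        exact (pvA_loop (PySem.List.sorted (pvClean xs) (fun x => pvKey x) false)
          PySem.Set.empty [] [] (by simp [PySem.Set.empty])).trans (by simp)
      have hB : normalize_names_py_alt (some xs)
          = PySem.List.sorted (pvDedup [] (pvClean xs)) (fun x => pvKey x) false := by
        simp only [normalize_names_py_alt, Option.getD_some]
        rw [pvB_loop xs PySem.Dict.empty [] (by simp)]
        simp only [PySem.Dict.values, PySem.Dict.empty, List.map_nil, List.nil_append]
        rfl
      rw [hA, hB]
      refine (PySem.List.sorted_eq_of_perm_of_pairwise_lt _ _ _ ?_ ?_).symm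
      · -- permutation: both are nodup with the same members (by sort stability)
        have nd1 : (pvDedup [] (PySem.List.sorted (pvClean xs) (fun x => pvKey x) false)).Nodup :=
          List.Nodup.of_map pvKey (pvDedup_keys_nodup _ []).1
        have nd2 : (pvDedup [] (pvClean xs)).Nodup :=
          List.Nodup.of_map pvKey (pvDedup_keys_nodup _ []).1
        refine (List.perm_ext_iff_of_nodup nd1 nd2).mpr ?_
        intro a
        rw [mem_pvDedup, mem_pvDedup, pvSorted_filter_stable]
      · -- strictly increasing keys
        have hle : (pvDedup [] (PySem.List.sorted (pvClean xs) (fun x => pvKey x) false)).Pairwise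
            (fun a b => pvKey a ≤ pvKey b) :=
          List.Pairwise.sublist (pvDedup_sublist _ []) (PySem.List.sorted_pairwise (pvClean xs) (fun x => pvKey x))
        have hne : (pvDedup [] (PySem.List.sorted (pvClean xs) (fun x => pvKey x) false)).Pairwise
            (fun a b => pvKey a ≠ pvKey b) :=
          List.pairwise_map.mp (pvDedup_keys_nodup _ []).1
        exact (hle.and hne).imp (fun h => lt_of_le_of_ne h.1 h.2)
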